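-- pv_equiv track=rewrite | github.com/UW-CSE442-WI20/FP-music-vibez | data/cleanAlbumTitle.py | clean_album_title
-- ===== SOURCE A (Python) =====
-- def clean_album_title(title):
--     # remove ()
--     # fix casing]
--     # trim
--
--     title = title.lower()
--     result = ""
--     first_letter = True
--     for char in title:
--         if char == '(':
--             break
--         elif char == ' ':
--             first_letter = True
--             result += char
--         elif first_letter:
--             result += char.upper()
--             first_letter = False
--         else:
--             result += char
--     return result.strip()
-- ===== SOURCE B (Python) =====
-- def clean_album_title(title):
--     # tokenize-transform-join pipeline instead of a stateful character loop
--     head = title.lower().split('(', 1)[0]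
--     words = head.split(' ')
--     return ' '.join(w[:1].upper() + w[1:] for w in words).strip()
-- ===== Notes on version B (the rewrite author's own statement) =====
-- stated objective: idiomatic
-- what changed: Replaced the stateful first-letter character loop that grows a string char by char with a tokenize-transform-join pipeline: take the part before the first '(', split on spaces, uppercase each word's first character, join and strip.
import Mathlib
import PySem

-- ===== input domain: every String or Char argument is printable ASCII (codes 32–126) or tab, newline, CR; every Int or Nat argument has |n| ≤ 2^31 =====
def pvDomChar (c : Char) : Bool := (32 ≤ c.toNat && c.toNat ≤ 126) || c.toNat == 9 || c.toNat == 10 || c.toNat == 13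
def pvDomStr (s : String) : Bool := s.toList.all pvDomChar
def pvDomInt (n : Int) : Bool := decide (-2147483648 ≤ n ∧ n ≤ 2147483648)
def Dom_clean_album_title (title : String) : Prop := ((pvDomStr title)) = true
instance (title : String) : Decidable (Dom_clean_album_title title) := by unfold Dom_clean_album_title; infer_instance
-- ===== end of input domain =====

-- B replaces A's stateful first-letter character loop by a split-on-space / capitalize / join pipeline (objective: idiomatic).

-- ===== PORT A =====
-- the for-loop with its `result` string and `first_letter` flag; `break` at '(' returns the accumulator
def cleanLoopA : List Char → Bool → List Char → List Char
  | [], _, result => result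
  | c :: rest, first, result =>
    if c = '(' then result
    else if c = ' ' then cleanLoopA rest true (result ++ [c])
    else if first then cleanLoopA rest false (result ++ [PySem.Chars.upperChar c])
    else cleanLoopA rest false (result ++ [c])

def clean_album_title (title : String) : String :=
  String.ofList (PySem.Chars.strip (cleanLoopA (PySem.Chars.lower title.toList) true []))

-- ===== PORT B =====
-- w[:1].upper() + w[1:]
def capWordB (w : List Char) : List Char :=
  PySem.Chars.upper (PySem.List.slice w none (some 1)) ++ PySem.List.slice w (some 1) none

-- head = title.lower().split('(', 1)[0]  (split never returns an empty list, so [0] is headD);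
-- then ' '.join(w[:1].upper() + w[1:] for w in head.split(' ')).strip()
def clean_album_title_alt (title : String) : String :=
  String.ofList (PySem.Chars.strip (PySem.Chars.join [' ']
    ((PySem.Chars.splitOn
        ((PySem.Chars.splitOnMax (PySem.Chars.lower title.toList) ['('] 1).headD [])
        [' ']).map capWordB)))

-- ===== PRECONDITION & SPEC =====
def Spec_clean_album_title (title : String) (out : String) : Prop := out = clean_album_title_alt title
instance (title : String) (out : String) : Decidable (Spec_clean_album_title title out) := by unfold Spec_clean_album_title; infer_instance

-- ===== CLAIM (what is proved, stated in full; the proofs are below) =====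
def Claim_equal_clean_album_title : Prop := ∀ (title : String), Dom_clean_album_title title → Spec_clean_album_title title (clean_album_title title)

-- ===== LEMMAS AND PROOFS =====

-- the common specification: capitalize after start-of-string / after a space, up to end of input
def capSpec : List Char → Bool → List Char
  | [], _ => []
  | c :: rest, first =>
    if c = ' ' then c :: capSpec rest true
    else (if first then PySem.Chars.upperChar c else c) :: capSpec rest false

-- plain recursive description of splitting on a single space
def splitSp (cur : List Char) : List Char → List (List Char)
  | [] => [cur]
  | c :: rest => if c = ' ' then cur :: splitSp [] rest else splitSp (cur ++ [c]) rest

theorem cleanLoopA_eq (l : List Char) : ∀ (first : Bool) (acc : List Char),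
    cleanLoopA l first acc = acc ++ capSpec (l.takeWhile (· ≠ '(')) first := by
  induction l with
  | nil => intro first acc; simp [cleanLoopA, capSpec]
  | cons c rest ih =>
    intro first acc
    by_cases hp : c = '('
    · simp [cleanLoopA, hp, capSpec]
    · by_cases hs : c = ' '
      · simp [cleanLoopA, hs, capSpec, ih]
      · cases first <;> simp [cleanLoopA, hp, hs, capSpec, ih]

theorem capWordB_nil : capWordB [] = [] := by decide

theorem capWordB_cons (c : Char) (cs : List Char) :
    capWordB (c :: cs) = PySem.Chars.upperChar c :: cs := by
  simp [capWordB, PySem.List.slice, PySem.Chars.upper]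

-- m = 0: splitOnMax.go returns at once
theorem goMax_zero (sep : List Char) (fuel : Nat) (l cur : List Char) (acc : List (List Char)) :
    PySem.Chars.splitOnMax.go sep fuel 0 l cur acc = ((cur.reverse ++ l) :: acc).reverse := by
  cases fuel with
  | zero => rfl
  | succ f => cases l with
    | nil => simp [PySem.Chars.splitOnMax.go]
    | cons c rest => simp [PySem.Chars.splitOnMax.go]

-- m = 1, sep = "(": the two pieces are the part before the first '(' and the part after it
theorem goMax_one (fuel : Nat) : ∀ (l cur : List Char) (acc : List (List Char)), l.length ≤ fuel →
    PySem.Chars.splitOnMax.go ['('] fuel 1 l cur acc =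
      if '(' ∈ l then
        acc.reverse ++ [cur.reverse ++ l.takeWhile (· ≠ '('), (l.dropWhile (· ≠ '(')).tail]
      else acc.reverse ++ [cur.reverse ++ l] := by
  induction fuel with
  | zero =>
    intro l cur acc h
    have : l = [] := List.eq_nil_of_length_eq_zero (Nat.le_zero.mp h)
    subst this; simp [PySem.Chars.splitOnMax.go]
  | succ f ih =>
    intro l cur acc h
    cases l with
    | nil => simp [PySem.Chars.splitOnMax.go]
    | cons c rest =>
      by_cases hp : c = '('
      · subst hp
        simp [PySem.Chars.splitOnMax.go, List.isPrefixOf, goMax_zero]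
      · have hpre : List.isPrefixOf ['('] (c :: rest) = false := by
          simp [List.isPrefixOf]; exact fun h => absurd h.symm hp
        have hlen : rest.length ≤ f := by simpa using Nat.lt_succ_iff.mp (by simpa using h)
        simp only [PySem.Chars.splitOnMax.go, hpre]
        rw [if_neg (by omega : ¬ (1 : Nat) = 0)]
        rw [ih rest (c :: cur) acc hlen]
        by_cases hm : '(' ∈ rest <;>
          simp [hm, hp, Ne.symm hp]

theorem head_splitOnMax (l : List Char) :
    (PySem.Chars.splitOnMax l ['('] 1).headD [] = l.takeWhile (· ≠ '(') := by
  unfold PySem.Chars.splitOnMax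
  rw [if_neg (by omega : ¬ (1 : Int) < 0)]
  show (PySem.Chars.splitOnMax.go ['('] _ 1 _ _ _).headD [] = _
  rw [goMax_one (l.length + 1) l [] [] (by omega)]
  by_cases hm : '(' ∈ l
  · simp [hm]
  · have : List.takeWhile (fun x => !decide (x = '(')) l = l :=
      List.takeWhile_eq_self_iff.mpr (fun c hc => by
        simpa using fun h : c = '(' => hm (h ▸ hc))
    simp [hm, this]

-- splitOn.go with sep = " " computes splitSp
theorem goSplit (fuel : Nat) : ∀ (l cur : List Char) (acc : List (List Char)), l.length ≤ fuel →
    PySem.Chars.splitOn.go [' '] fuel l cur acc = acc.reverse ++ splitSp cur.reverse l := by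
  induction fuel with
  | zero =>
    intro l cur acc h
    have : l = [] := List.eq_nil_of_length_eq_zero (Nat.le_zero.mp h)
    subst this; simp [PySem.Chars.splitOn.go, splitSp]
  | succ f ih =>
    intro l cur acc h
    cases l with
    | nil => simp [PySem.Chars.splitOn.go, splitSp]
    | cons c rest =>
      have hlen : rest.length ≤ f := by simpa using Nat.lt_succ_iff.mp (by simpa using h)
      by_cases hs : c = ' '
      · subst hs
        simp only [PySem.Chars.splitOn.go, List.isPrefixOf, BEq.rfl, Bool.true_and,
          List.length_cons, List.length_nil, List.drop_succ_cons, List.drop_zero]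
        rw [ih rest [] (cur.reverse :: acc) hlen]
        simp [splitSp]
      · have hpre : List.isPrefixOf [' '] (c :: rest) = false := by
          simp [List.isPrefixOf]; exact fun h => absurd h.symm hs
        simp only [PySem.Chars.splitOn.go, hpre]
        rw [ih rest (c :: cur) acc hlen]
        simp [splitSp, hs]

theorem splitOn_eq_splitSp (l : List Char) :
    PySem.Chars.splitOn l [' '] = splitSp [] l := by
  unfold PySem.Chars.splitOn
  rw [goSplit (l.length + 1) l [] [] (by omega)]
  simp

theorem splitSp_ne_nil (cur l : List Char) : splitSp cur l ≠ [] := by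
  cases l with
  | nil => simp [splitSp]
  | cons c rest =>
    by_cases hs : c = ' '
    · simp [splitSp, hs]
    · simp only [splitSp, if_neg hs]; exact splitSp_ne_nil _ rest

theorem join_map_cap (l : List Char) : ∀ (cur : List Char),
    PySem.Chars.join [' '] ((splitSp cur l).map capWordB) =
      capWordB cur ++ capSpec l cur.isEmpty := by
  induction l with
  | nil => intro cur; simp [splitSp, capSpec, PySem.Chars.join, List.intercalate]
  | cons c rest ih =>
    intro cur
    by_cases hs : c = ' '
    · subst hs
      obtain ⟨y, ys, hys⟩ := List.exists_cons_of_ne_nil (splitSp_ne_nil [] rest)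
      have hsp : splitSp cur (' ' :: rest) = cur :: y :: ys := by simp [splitSp, hys]
      have h2 := ih ([] : List Char)
      rw [hys] at h2
      rw [hsp, List.map_cons, List.map_cons, PySem.Chars.join_cons_cons, ← List.map_cons, h2]
      simp [capSpec, capWordB_nil]
    · simp only [splitSp, if_neg hs]
      rw [ih (cur ++ [c])]
      cases cur with
      | nil => simp [capSpec, hs, capWordB_nil, capWordB_cons]
      | cons d ds => simp [capSpec, hs, capWordB_cons]

-- ===== VERDICT (by name: the statement is the Claim_ definition above) =====
theorem clean_album_title_spec : Claim_equal_clean_album_title := by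
  intro title _
  unfold Spec_clean_album_title clean_album_title clean_album_title_alt
  rw [head_splitOnMax, splitOn_eq_splitSp, join_map_cap, cleanLoopA_eq]
  simp [capWordB_nil]
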